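-- pv_equiv track=rewrite | github.com/Ricardo-Ceia/OpenCircuit | app/domain/identity.py | assign_stable_aliases
-- ===== SOURCE A (Python) =====
-- def assign_stable_aliases(devices: list[dict]) -> list[dict]:
--     """
--     For same-type unidentified devices, assign stable numbered aliases.
--     e.g. Two "Unidentified Apple iOS Device" -> "Apple iOS Device #1", "#2"
--     Sorts by first_seen for stable ordering.
--
--     Modifies devices in place and returns the list.
--     """
--     # Group by base label (strip "Unidentified " prefix for grouping)
--     groups: dict[str, list[dict]] = {}
--     for d in devices:
--         identity = d.get("identity_status", "unidentified")
--         if identity in ("verified", "claimed"):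
--             continue
--         label = d.get("label", "Unidentified device")
--         # Group key: strip "Unidentified " prefix for grouping
--         if label.startswith("Unidentified "):
--             key = label[len("Unidentified "):]
--         else:
--             key = label
--         groups.setdefault(key, []).append(d)
--
--     for key, group in groups.items():
--         if len(group) < 2:
--             continue
--         # Sort by first_seen for stable ordering
--         group.sort(
--             key=lambda d: d.get("first_seen", ""),
--             reverse=False,
--         )
--         for i, d in enumerate(group, 1):
--             d["alias"] = f"{key} #{i}"
--             # Update label to show alias
--             d["label"] = d["alias"]
--
--     return devices
-- ===== SOURCE B (Python) =====
-- def assign_stable_aliases(devices: list[dict]) -> list[dict]: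
--     """Rank-counting re-implementation: no dict of groups, no sort.
--
--     One pass snapshots (index, group key, first_seen) for every
--     unidentified device; each such device's alias number is then computed
--     directly as 1 + how many same-key devices precede it under the
--     stable order (first_seen, original position).
--
--     Modifies devices in place and returns the list.
--     """
--     eligible = []
--     for i, d in enumerate(devices):
--         if d.get("identity_status", "unidentified") in ("verified", "claimed"):
--             continue
--         label = d.get("label", "Unidentified device")
--         key = label[len("Unidentified "):] if label.startswith("Unidentified ") else label
--         eligible.append((i, key, d.get("first_seen", "")))
--     for i, key, fs in eligible:
--         grp = [t for t in eligible if t[1] == key]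
--         if len(grp) >= 2:
--             rank = 1 + sum(1 for t in grp if t[2] < fs or (t[2] == fs and t[0] < i))
--             alias = f"{key} #{rank}"
--             devices[i]["alias"] = alias
--             devices[i]["label"] = alias
--     return devices
-- ===== Notes on version B (the rewrite author's own statement) =====
-- stated objective: alternative
-- what changed: Replaces the dict-of-groups plus per-group stable sort with a single snapshot pass and a direct rank count: each unidentified device's alias number is 1 + the number of same-key devices preceding it under (first_seen, original position), so no grouping dict and no sort remain.
import Mathlib
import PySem

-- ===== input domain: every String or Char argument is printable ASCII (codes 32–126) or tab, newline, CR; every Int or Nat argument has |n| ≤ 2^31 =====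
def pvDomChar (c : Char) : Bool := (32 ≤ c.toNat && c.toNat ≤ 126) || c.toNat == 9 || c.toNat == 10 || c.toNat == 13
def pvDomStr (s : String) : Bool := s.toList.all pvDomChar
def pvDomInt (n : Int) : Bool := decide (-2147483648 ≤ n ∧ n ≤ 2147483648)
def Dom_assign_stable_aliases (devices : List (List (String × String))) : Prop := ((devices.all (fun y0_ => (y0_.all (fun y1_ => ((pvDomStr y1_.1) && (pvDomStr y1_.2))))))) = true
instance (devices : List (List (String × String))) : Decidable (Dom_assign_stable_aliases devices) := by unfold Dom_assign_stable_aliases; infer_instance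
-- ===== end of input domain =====

-- B replaces A's dict-of-groups plus per-group stable sort by a direct rank count per
-- unidentified device (alternative algorithm, similar cost, no speed claim). Both Pythons
-- mutate the dicts in place and return the list; the equivalence proved is about the
-- returned value (B performs the same in-place mutation).

-- shared accessors (the same field reads both Pythons perform)
def pvDget (d : List (String × String)) (k dflt : String) : String :=
  (PySem.Dict.mk d).getD k dflt

def pvEligible (d : List (String × String)) : Bool :=
  let s := pvDget d "identity_status" "unidentified"
  !(s == "verified" || s == "claimed")

def pvKey (d : List (String × String)) : String :=
  let label := pvDget d "label" "Unidentified device"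
  if PySem.Str.startswith label "Unidentified " then PySem.Str.slice label (some 13) none
  else label

def pvSetAlias (d : List (String × String)) (a : String) : List (String × String) :=
  (((PySem.Dict.mk d).insert "alias" a).insert "label" a).items

-- ===== PORT A =====
def assign_stable_aliases (devices : List (List (String × String))) : List (List (String × String)) :=
  let groups : PySem.Dict String (List Int) :=
    (PySem.List.enumerate devices).foldl
      (fun g p => if pvEligible p.2 then g.modify (pvKey p.2) [] (fun l => l ++ [p.1]) else g)
      PySem.Dict.empty
  groups.items.foldl
    (fun devs kg =>
      if kg.2.length < 2 then devs
      else
        let sortedGroup :=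
          PySem.List.sorted kg.2 (fun i => pvDget (devs.getD i.toNat []) "first_seen" "")
        (PySem.List.enumerate sortedGroup 1).foldl
          (fun ds q => ds.set q.2.toNat (pvSetAlias (ds.getD q.2.toNat []) (kg.1 ++ " #" ++ PySem.Int.toStr q.1)))
          devs)
    devices

-- ===== PORT B =====
def assign_stable_aliases_alt (devices : List (List (String × String))) : List (List (String × String)) :=
  let eligible : List (Int × String × String) :=
    ((PySem.List.enumerate devices).filter (fun p => pvEligible p.2)).map
      (fun p => (p.1, pvKey p.2, pvDget p.2 "first_seen" ""))
  eligible.foldl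
    (fun devs t =>
      let grp := eligible.filter (fun u => u.2.1 == t.2.1)
      if 2 ≤ grp.length then
        let r : Int := 1 + (grp.countP (fun u => u.2.2 < t.2.2 || (u.2.2 == t.2.2 && u.1 < t.1)) : Int)
        devs.set t.1.toNat (pvSetAlias (devs.getD t.1.toNat []) (t.2.1 ++ " #" ++ PySem.Int.toStr r))
      else devs)
    devices

-- ===== PRECONDITION & SPEC =====
def Spec_assign_stable_aliases (devices : List (List (String × String))) (out : List (List (String × String))) : Prop := out = assign_stable_aliases_alt devices
instance (devices : List (List (String × String))) (out : List (List (String × String))) : Decidable (Spec_assign_stable_aliases devices out) := by unfold Spec_assign_stable_aliases; infer_instance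

-- ===== CLAIM (what is proved, stated in full; the proofs are below) =====
def Claim_equal_assign_stable_aliases : Prop := ∀ (devices : List (List (String × String))), Dom_assign_stable_aliases devices → Spec_assign_stable_aliases devices (assign_stable_aliases devices)

-- ===== LEMMAS AND PROOFS =====

-- canonical description of the common result, used as the bridge between the two ports
def pvEP (devices : List (List (String × String))) : List (Int × List (String × String)) :=
  (PySem.List.enumerate devices).filter (fun p => pvEligible p.2)

def pvFS (d : List (String × String)) : String := pvDget d "first_seen" ""

def pvGrp (devices : List (List (String × String))) (k : String) :
    List (Int × List (String × String)) :=
  (pvEP devices).filter (fun p => pvKey p.2 == k)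

def pvLt (u p : Int × List (String × String)) : Bool :=
  pvFS u.2 < pvFS p.2 || (pvFS u.2 == pvFS p.2 && u.1 < p.1)

def pvAlias (k : String) (r : Int) : String := k ++ " #" ++ PySem.Int.toStr r

def pvUpd (devices : List (List (String × String))) (p : Int × List (String × String)) :
    List (String × String) :=
  pvSetAlias p.2
    (pvAlias (pvKey p.2)
      (1 + ((pvGrp devices (pvKey p.2)).countP (fun u => pvLt u p) : Int)))

def pvFinal (devices : List (List (String × String))) : List (List (String × String)) :=
  (PySem.List.enumerate devices).map (fun p =>
    if pvEligible p.2 && decide (2 ≤ (pvGrp devices (pvKey p.2)).length) then pvUpd devices p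
    else p.2)

def pvGIdx (devices : List (List (String × String))) (k : String) : List Int :=
  (pvGrp devices k).map (fun p => p.1)

def pvKeys (devices : List (List (String × String))) : List String :=
  PySem.Set.ofList ((pvEP devices).map (fun p => pvKey p.2))

def pvF0 (devices : List (List (String × String))) (i : Int) : String :=
  pvFS (devices.getD i.toNat [])

def pvRb (f : Int → String) (a b : Int) : Bool :=
  decide (f a < f b) || (f a == f b && decide (a < b))

def pvPartial (devices : List (List (String × String))) (done : List String) :
    List (List (String × String)) :=
  (PySem.List.enumerate devices).map (fun p =>
    if pvEligible p.2 && decide (pvKey p.2 ∈ done) &&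
        decide (2 ≤ (pvGrp devices (pvKey p.2)).length) then pvUpd devices p
    else p.2)

-- A's outer loop body, applied to the items of the grouping dict
def pvStep2 (devices : List (List (String × String))) (devs : List (List (String × String)))
    (k : String) : List (List (String × String)) :=
  if (pvGIdx devices k).length < 2 then devs
  else
    (PySem.List.enumerate
      (PySem.List.sorted (pvGIdx devices k)
        (fun i => pvDget (devs.getD i.toNat []) "first_seen" "")) 1).foldl
      (fun ds q => ds.set q.2.toNat (pvSetAlias (ds.getD q.2.toNat []) (k ++ " #" ++ PySem.Int.toStr q.1)))
      devs

-- small generic facts ------------------------------------------------------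

lemma pv_countP_congr {α : Type} (l : List α) (p q : α → Bool)
    (h : ∀ x ∈ l, p x = q x) : l.countP p = l.countP q := by
  induction l with
  | nil => simp
  | cons x t ih =>
    simp only [List.countP_cons]
    rw [h x (by simp), ih (fun y hy => h y (by simp [hy]))]

lemma pv_find?_congr {α : Type} (l : List α) (p q : α → Bool)
    (h : ∀ x ∈ l, p x = q x) : l.find? p = l.find? q := by
  induction l with
  | nil => simp
  | cons x t ih =>
    simp only [List.find?_cons]
    rw [h x (by simp)]
    cases hq : q x with
    | true => rfl
    | false => exact ih (fun y hy => h y (by simp [hy]))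

lemma pv_getD_eq (xs : List (List (String × String))) (m : Nat) (hm : m < xs.length) :
    xs.getD m [] = xs[m] := by
  rw [List.getD_eq_getElem?_getD, List.getElem?_eq_getElem hm]
  rfl

lemma pvRb_iff (f : Int → String) (a b : Int) :
    pvRb f a b = true ↔ (f a < f b ∨ (f a = f b ∧ a < b)) := by
  simp [pvRb]

lemma pvRb_asymm (f : Int → String) (a b : Int) (h : pvRb f a b = true) : pvRb f b a = false := by
  rcases (pvRb_iff f a b).mp h with h1 | ⟨h1, h2⟩
  · have n1 : ¬ (f b < f a) := lt_asymm h1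
    have n2 : ¬ (f b = f a) := (ne_of_lt h1).symm
    simp [pvRb, n1, n2]
  · have n1 : ¬ (f b < f a) := by rw [h1]; exact lt_irrefl _
    have n2 : ¬ (b < a) := by omega
    by_cases he : f b = f a
    · simp [pvRb, n1, n2]
    · simp [pvRb, n1, he]

lemma pvRb_irrefl (f : Int → String) (a : Int) : pvRb f a a = false := by
  simp [pvRb]

-- the generic in-place update fold, pointwise --------------------------------

lemma pv_master0 {α : Type} (pos : α → Nat) (val : α → String) :
    ∀ (src : List α) (devs : List (List (String × String))), (src.map pos).Nodup → ∀ (j : Nat),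
    (src.foldl (fun ds t => ds.set (pos t) (pvSetAlias (ds.getD (pos t) []) (val t))) devs)[j]? =
      (src.find? (fun t => pos t == j)).elim devs[j]?
        (fun t => if j < devs.length then some (pvSetAlias (devs.getD j []) (val t)) else none) := by
  intro src
  induction src with
  | nil => intro devs _ j; simp
  | cons a rest ih =>
    intro devs hnd j
    have hnd0 : (pos a :: rest.map pos).Nodup := by simpa using hnd
    obtain ⟨hanotin, hnd'⟩ := List.nodup_cons.mp hnd0
    simp only [List.foldl_cons]
    set devs' := devs.set (pos a) (pvSetAlias (devs.getD (pos a) []) (val a)) with hdevs'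
    have hlen' : devs'.length = devs.length := List.length_set
    rw [ih devs' hnd' j]
    by_cases hj : pos a = j
    · subst hj
      have hfr : rest.find? (fun t => pos t == pos a) = none := by
        rw [List.find?_eq_none]
        intro b hb
        simp only [beq_iff_eq]
        intro hba
        exact hanotin (List.mem_map.mpr ⟨b, hb, hba⟩)
      rw [hfr]
      have hc : (pos a == pos a) = true := by simp
      simp only [List.find?_cons, hc, Option.elim_none, Option.elim_some]
      by_cases hlt : pos a < devs.length
      · rw [if_pos hlt, hdevs', List.getElem?_set_self hlt]
      · rw [if_neg hlt, hdevs', List.set_eq_of_length_le (by omega),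
          List.getElem?_eq_none (by omega : devs.length ≤ pos a)]
    · have hc : (pos a == j) = false := by simp [hj]
      have hget : devs'[j]? = devs[j]? := List.getElem?_set_ne hj
      have hgetD : devs'.getD j [] = devs.getD j [] := by
        rw [List.getD_eq_getElem?_getD, List.getD_eq_getElem?_getD, hget]
      simp only [List.find?_cons, hc]
      cases hfr : rest.find? (fun t => pos t == j) with
      | none => simp only [Option.elim_none]; exact hget
      | some b => simp only [Option.elim_some]; rw [hlen', hgetD]

lemma pv_master {α : Type} (pos : α → Nat) (val : α → String) (cP : α → Prop)
    [DecidablePred cP] (src : List α) (devs : List (List (String × String)))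
    (hnd : ((src.filter (fun t => decide (cP t))).map pos).Nodup) (j : Nat) :
    (src.foldl (fun ds t => if cP t then ds.set (pos t) (pvSetAlias (ds.getD (pos t) []) (val t)) else ds) devs)[j]? =
      ((src.filter (fun t => decide (cP t))).find? (fun t => pos t == j)).elim devs[j]?
        (fun t => if j < devs.length then some (pvSetAlias (devs.getD j []) (val t)) else none) := by
  rw [PySem.List.foldl_ite_eq_foldl_filter]
  exact pv_master0 pos val _ devs hnd j

-- find? at a fixed index ----------------------------------------------------

lemma pv_find?_enumerate_at (c : (Int × List (String × String)) → Bool) :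
    ∀ (xs : List (List (String × String))) (j : Nat) (hj : j < xs.length) (s : Nat),
    (PySem.List.enumerate xs (s : Int)).find? (fun p => c p && p.1 == ((s + j : Nat) : Int)) =
      if c (((s + j : Nat) : Int), xs[j]) then some ((((s + j : Nat) : Int)), xs[j]) else none := by
  intro xs
  induction xs with
  | nil => intro j hj; simp at hj
  | cons x t ih =>
    intro j hj s
    rw [PySem.List.enumerate_cons]
    simp only [List.find?_cons]
    cases j with
    | zero =>
      have hpred : (c ((s : Int), x) && ((s : Int) == ((s + 0 : Nat) : Int))) = c ((s : Int), x) := by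
        simp
      rw [hpred]
      cases hc : c ((s : Int), x) with
      | true => simp [hc]
      | false =>
        rw [if_neg (by simp [hc])]
        rw [List.find?_eq_none]
        intro p hp
        have hcast : ((s : Int) + 1) = ((s + 1 : Nat) : Int) := by push_cast; ring
        rw [hcast] at hp
        rcases (PySem.List.mem_enumerate_iff t _ p).mp hp with ⟨m, hm, rfl⟩
        simp only [Bool.and_eq_true, beq_iff_eq]
        rintro ⟨-, h⟩
        omega
    | succ m =>
      have hpred : (c ((s : Int), x) && ((s : Int) == ((s + (m + 1) : Nat) : Int))) = false := by
        simp only [Bool.and_eq_false_iff]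
        right
        simp only [beq_eq_false_iff_ne, ne_eq]
        intro h
        omega
      rw [hpred]
      have hcast : ((s : Int) + 1) = ((s + 1 : Nat) : Int) := by push_cast; ring
      rw [hcast]
      have hrec := ih m (by simpa using Nat.lt_of_succ_lt_succ hj) (s + 1)
      have harg : (s + 1 + m : Nat) = (s + (m + 1) : Nat) := by omega
      rw [harg] at hrec
      simpa using hrec

lemma pv_find?_enum_val (Rb : Int → Int → Bool)
    (hasym : ∀ a b, Rb a b = true → Rb b a = false) (hirr : ∀ a, Rb a a = false) (j : Nat) :
    ∀ (zs : List Int), zs.Pairwise (fun a b => Rb a b = true) → (∀ i ∈ zs, 0 ≤ i) →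
      ((j : Int) ∈ zs) → ∀ (s : Int),
    (PySem.List.enumerate zs s).find? (fun q => q.2.toNat == j) =
      some (s + (zs.countP (fun y => Rb y (j : Int)) : Int), (j : Int)) := by
  intro zs
  induction zs with
  | nil => intro _ _ h; simp at h
  | cons i t ih =>
    intro hpw hnn hmem s
    obtain ⟨hpw1, hpw2⟩ := List.pairwise_cons.mp hpw
    have hi0 : 0 ≤ i := hnn i (by simp)
    rw [PySem.List.enumerate_cons]
    simp only [List.find?_cons]
    by_cases hij : i = (j : Int)
    · have hc : ((s, i).2.toNat == j) = true := by
        simp only [beq_iff_eq]; omega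
      rw [hc]
      have h0 : Rb i ((j : Int)) = false := by rw [hij]; exact hirr _
      have ht0 : t.countP (fun y => Rb y ((j : Int))) = 0 := by
        rw [List.countP_eq_zero]
        intro y hy
        have hy' := hpw1 y hy
        rw [hij] at hy'
        simp [hasym _ y hy']
      have hcnt0 : ((i :: t).countP (fun y => Rb y ((j : Int)))) = 0 := by
        rw [List.countP_cons]
        simp [h0, ht0]
      rw [hcnt0]
      simp [hij]
    · have hc : (((s : Int), i).2.toNat == j) = false := by
        simp only [beq_eq_false_iff_ne, ne_eq]
        intro h
        exact hij (by omega)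
      rw [hc]
      have hmem' : (j : Int) ∈ t := by
        rcases List.mem_cons.mp hmem with h | h
        · exact absurd h.symm hij
        · exact h
      have hRij : Rb i (j : Int) = true := hpw1 _ hmem'
      rw [ih hpw2 (fun x hx => hnn x (by simp [hx])) hmem' (s + 1)]
      have hcnt : (s + 1 + ((t.countP fun y => Rb y (j : Int)) : Int)) =
          (s + (((i :: t).countP fun y => Rb y (j : Int)) : Int)) := by
        rw [List.countP_cons]
        simp [hRij]
        ring
      rw [hcnt]

lemma pv_find?_enum_val_none (j : Nat) (zs : List Int)
    (hnn : ∀ i ∈ zs, 0 ≤ i) (hmem : (j : Int) ∉ zs) (s : Int) :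
    (PySem.List.enumerate zs s).find? (fun q => q.2.toNat == j) = none := by
  rw [List.find?_eq_none]
  intro q hq
  rcases (PySem.List.mem_enumerate_iff zs s q).mp hq with ⟨m, hm, rfl⟩
  simp only [beq_iff_eq]
  intro hEq
  have h0 : 0 ≤ zs[m] := hnn _ (by simp)
  have : zs[m] = (j : Int) := by omega
  exact hmem (this ▸ List.getElem_mem hm)

-- stability of the ported insertion sort -------------------------------------

def pvR (f : Int → String) (a b : Int) : Prop := f a < f b ∨ (f a = f b ∧ a < b)

lemma pv_insertBy_cons (b : Int → Int → Bool) (x y : Int) (ys : List Int) :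
    PySem.List.insertBy b x (y :: ys) =
      if b x y then x :: y :: ys else y :: PySem.List.insertBy b x ys := rfl

lemma pv_insertBy_pairwise (f : Int → String) (x : Int) :
    ∀ (acc : List Int), acc.Pairwise (pvR f) → (∀ y ∈ acc, y < x) →
    (PySem.List.insertBy (fun a b => decide (f a < f b)) x acc).Pairwise (pvR f) := by
  intro acc
  induction acc with
  | nil => intro _ _; simp [PySem.List.insertBy, List.pairwise_cons]
  | cons y ys ih =>
    intro hpw hlt
    rw [pv_insertBy_cons]
    by_cases hxy : f x < f y
    · rw [if_pos (by simpa using hxy)]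
      refine List.pairwise_cons.mpr ⟨?_, hpw⟩
      intro z hz
      rcases List.mem_cons.mp hz with rfl | hz'
      · exact Or.inl hxy
      · have hyz : pvR f y z := (List.pairwise_cons.mp hpw).1 z hz'
        rcases hyz with h | ⟨h, _⟩
        · exact Or.inl (lt_trans hxy h)
        · exact Or.inl (h ▸ hxy)
    · rw [if_neg (by simpa using hxy)]
      refine List.pairwise_cons.mpr ⟨?_, ih (List.pairwise_cons.mp hpw).2
        (fun z hz => hlt z (by simp [hz]))⟩
      intro z hz
      rcases (PySem.List.mem_insertBy _ _ _ _).mp hz with rfl | hz'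
      · rcases lt_or_eq_of_le (le_of_not_gt hxy) with h | h
        · exact Or.inl h
        · exact Or.inr ⟨h, hlt y (by simp)⟩
      · exact (List.pairwise_cons.mp hpw).1 z hz'

lemma pv_foldl_insertBy_pairwise (f : Int → String) :
    ∀ (l acc : List Int), l.Pairwise (· < ·) → acc.Pairwise (pvR f) →
      (∀ y ∈ acc, ∀ x ∈ l, y < x) →
    (l.foldl (fun acc x => PySem.List.insertBy (fun a b => decide (f a < f b)) x acc)
      acc).Pairwise (pvR f) := by
  intro l
  induction l with
  | nil => intro acc _ hacc _; simpa using hacc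
  | cons x t ih =>
    intro acc hl hacc hsep
    simp only [List.foldl_cons]
    refine ih _ (List.pairwise_cons.mp hl).2
      (pv_insertBy_pairwise f x acc hacc (fun y hy => hsep y hy x (by simp))) ?_
    intro y hy z hz
    rcases (PySem.List.mem_insertBy _ _ _ _).mp hy with rfl | hy'
    · exact (List.pairwise_cons.mp hl).1 z hz
    · exact hsep y hy' z (by simp [hz])

lemma pv_sorted_pairwise_stable (f : Int → String) (l : List Int) (hl : l.Pairwise (· < ·)) :
    (PySem.List.sorted l f).Pairwise (pvR f) := by
  rw [PySem.List.sorted_eq_foldl_insertBy]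
  exact pv_foldl_insertBy_pairwise f l [] hl (by simp) (by simp)

-- facts about the eligible list and groups -----------------------------------

lemma pvEP_mem (devices : List (List (String × String))) (p : Int × List (String × String))
    (hp : p ∈ pvEP devices) :
    ∃ (m : Nat) (hm : m < devices.length),
      p = ((m : Int), devices[m]) ∧ pvEligible devices[m] = true := by
  rcases List.mem_filter.mp hp with ⟨hmem, helig⟩
  rcases (PySem.List.mem_enumerate_iff devices 0 p).mp hmem with ⟨m, hm, rfl⟩
  exact ⟨m, hm, by simp, by simpa using helig⟩

lemma pvEP_pairwise (devices : List (List (String × String))) :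
    (pvEP devices).Pairwise (fun p q => p.1 < q.1) :=
  (PySem.List.pairwise_lt_enumerate devices 0).filter _

lemma pvGrp_pairwise (devices : List (List (String × String))) (k : String) :
    (pvGrp devices k).Pairwise (fun p q => p.1 < q.1) :=
  (pvEP_pairwise devices).filter _

lemma pvGrp_mem (devices : List (List (String × String))) (k : String)
    (p : Int × List (String × String)) (hp : p ∈ pvGrp devices k) :
    ∃ (m : Nat) (hm : m < devices.length),
      p = ((m : Int), devices[m]) ∧ pvEligible devices[m] = true ∧ pvKey devices[m] = k := by
  rcases List.mem_filter.mp hp with ⟨hmem, hkey⟩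
  rcases pvEP_mem devices p hmem with ⟨m, hm, rfl, helig⟩
  exact ⟨m, hm, rfl, helig, by simpa using hkey⟩

lemma pvGrp_mem_of (devices : List (List (String × String))) (m : Nat)
    (hm : m < devices.length) (helig : pvEligible devices[m] = true) :
    ((m : Int), devices[m]) ∈ pvGrp devices (pvKey devices[m]) := by
  refine List.mem_filter.mpr ⟨List.mem_filter.mpr ⟨?_, by simpa using helig⟩, by simp⟩
  exact (PySem.List.mem_enumerate_iff devices 0 _).mpr ⟨m, hm, by simp⟩

lemma pvGIdx_pairwise (devices : List (List (String × String))) (k : String) :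
    (pvGIdx devices k).Pairwise (· < ·) := by
  rw [pvGIdx, List.pairwise_map]
  exact pvGrp_pairwise devices k

lemma pvGIdx_nodup (devices : List (List (String × String))) (k : String) :
    (pvGIdx devices k).Nodup :=
  (pvGIdx_pairwise devices k).imp (fun h => ne_of_lt h)

lemma pvGIdx_nonneg (devices : List (List (String × String))) (k : String) :
    ∀ i ∈ pvGIdx devices k, 0 ≤ i := by
  intro i hi
  rcases List.mem_map.mp hi with ⟨p, hp, rfl⟩
  rcases pvGrp_mem devices k p hp with ⟨m, hm, rfl, -, -⟩
  simp

lemma pvGIdx_mem_iff (devices : List (List (String × String))) (k : String) (j : Nat)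
    (hj : j < devices.length) :
    ((j : Int) ∈ pvGIdx devices k) ↔
      (pvEligible devices[j] = true ∧ pvKey devices[j] = k) := by
  constructor
  · intro h
    rcases List.mem_map.mp h with ⟨p, hp, hpj⟩
    rcases pvGrp_mem devices k p hp with ⟨m, hm, rfl, helig, hkey⟩
    have hmj : m = j := by simpa using hpj
    subst hmj
    exact ⟨helig, hkey⟩
  · rintro ⟨helig, hkey⟩
    refine List.mem_map.mpr ⟨((j : Int), devices[j]), ?_, rfl⟩
    have h := pvGrp_mem_of devices j hj helig
    rwa [hkey] at h

-- the grouping dict of port A -----------------------------------------------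

lemma pv_groups_spec (devices : List (List (String × String))) :
    ((PySem.List.enumerate devices).foldl
      (fun g p => if pvEligible p.2 then g.modify (pvKey p.2) [] (fun l => l ++ [p.1]) else g)
      PySem.Dict.empty).items =
    (pvKeys devices).map (fun k => (k, pvGIdx devices k)) := by
  have hfold : (PySem.List.enumerate devices).foldl
      (fun g p => if pvEligible p.2 then g.modify (pvKey p.2) [] (fun l => l ++ [p.1]) else g)
      PySem.Dict.empty =
    (pvEP devices).foldl (fun g p => g.modify (pvKey p.2) [] (fun l => l ++ [p.1]))
      PySem.Dict.empty := by
    exact PySem.List.foldl_if_eq_foldl_filter (fun (p : Int × List (String × String)) => pvEligible p.2) _ _ _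
  rw [hfold]
  have hnd : ((pvEP devices).foldl (fun g p => g.modify (pvKey p.2) [] (fun l => l ++ [p.1]))
      PySem.Dict.empty).keys.Nodup := by
    exact PySem.Dict.nodup_keys_foldl_modify_key (pvEP devices) (fun p => pvKey p.2) []
      (fun _ p => fun l => l ++ [p.1]) PySem.Dict.empty (by simp)
  have hkeys : ((pvEP devices).foldl (fun g p => g.modify (pvKey p.2) [] (fun l => l ++ [p.1]))
      PySem.Dict.empty).keys = pvKeys devices := by
    rw [PySem.Dict.keys_foldl_modify_key (pvEP devices) (fun p => pvKey p.2) []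
      (fun _ p => fun l => l ++ [p.1]) PySem.Dict.empty]
    rw [pvKeys, PySem.Set.ofList_eq_foldl]
    rfl
  have hgetD : ∀ k, ((pvEP devices).foldl
      (fun g p => g.modify (pvKey p.2) [] (fun l => l ++ [p.1]))
      PySem.Dict.empty).getD k [] = pvGIdx devices k := by
    intro k
    have hmapfold : (pvEP devices).foldl
        (fun g p => g.modify (pvKey p.2) [] (fun l => l ++ [p.1])) PySem.Dict.empty =
      ((pvEP devices).map (fun p => (pvKey p.2, p.1))).foldl
        (fun d pr => d.modify pr.1 [] (fun x => x ++ [pr.2])) PySem.Dict.empty := by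
      rw [List.foldl_map]
    rw [hmapfold, PySem.Dict.getD_foldl_modify_append]
    rw [List.filter_map]
    simp only [List.map_map, PySem.Dict.getD_empty, List.nil_append]
    rfl
  rw [PySem.Dict.items_eq_map_keys _ hnd ([] : List Int), hkeys]
  exact List.map_congr_left (fun k _ => by rw [hgetD k])

-- pvPartial basics -----------------------------------------------------------

lemma pv_partial_length (devices : List (List (String × String))) (done : List String) :
    (pvPartial devices done).length = devices.length := by
  simp [pvPartial, PySem.List.length_enumerate]

lemma pv_partial_getElem? (devices : List (List (String × String))) (done : List String)
    (j : Nat) (hj : j < devices.length) :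
    (pvPartial devices done)[j]? =
      some (if pvEligible devices[j] && decide (pvKey devices[j] ∈ done) &&
          decide (2 ≤ (pvGrp devices (pvKey devices[j])).length)
        then pvUpd devices ((j : Int), devices[j]) else devices[j]) := by
  rw [pvPartial, List.getElem?_map, PySem.List.getElem?_enumerate,
    List.getElem?_eq_getElem hj]
  simp

lemma pv_partial_nil (devices : List (List (String × String))) :
    pvPartial devices [] = devices := by
  rw [pvPartial]
  have : ∀ p ∈ PySem.List.enumerate devices 0,
      (if pvEligible p.2 && decide (pvKey p.2 ∈ ([] : List String)) &&
          decide (2 ≤ (pvGrp devices (pvKey p.2)).length) then pvUpd devices p else p.2) = p.2 := by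
    intro p _
    simp
  rw [List.map_congr_left this]
  exact PySem.List.map_snd_enumerate devices 0

lemma pv_partial_full (devices : List (List (String × String))) :
    pvPartial devices (pvKeys devices) = pvFinal devices := by
  rw [pvPartial, pvFinal]
  refine List.map_congr_left ?_
  intro p hp
  by_cases helig : pvEligible p.2
  · have hkmem : pvKey p.2 ∈ pvKeys devices := by
      rw [pvKeys, PySem.Set.mem_ofList]
      exact List.mem_map.mpr ⟨p, List.mem_filter.mpr ⟨hp, by simpa using helig⟩, rfl⟩
    simp [helig, hkmem]
  · simp [Bool.eq_false_iff.mpr helig]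

-- the B port computes pvFinal -------------------------------------------------

lemma pv_map_toNat_nodup {A : Type} (X : List (Int × A))
    (hpw : X.Pairwise (fun p q => p.1 < q.1)) (hnn : ∀ p ∈ X, 0 ≤ p.1) :
    (X.map (fun p => p.1.toNat)).Nodup := by
  refine List.pairwise_map.mpr (List.Pairwise.imp_of_mem ?_ hpw)
  intro p q hp hq hlt
  have h1 := hnn p hp
  have h2 := hnn q hq
  omega

lemma pv_int_toNat_nodup (zs : List Int) (hnd : zs.Nodup) (hnn : ∀ i ∈ zs, 0 ≤ i) :
    (zs.map Int.toNat).Nodup := by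
  refine List.pairwise_map.mpr (List.Pairwise.imp_of_mem ?_ hnd)
  intro a b ha hb hne
  have h1 := hnn a ha
  have h2 := hnn b hb
  omega

lemma pv_final_length (devices : List (List (String × String))) :
    (pvFinal devices).length = devices.length := by
  simp [pvFinal, PySem.List.length_enumerate]

lemma pv_final_getElem? (devices : List (List (String × String))) (j : Nat)
    (hj : j < devices.length) :
    (pvFinal devices)[j]? =
      some (if pvEligible devices[j] && decide (2 ≤ (pvGrp devices (pvKey devices[j])).length)
        then pvUpd devices ((j : Int), devices[j]) else devices[j]) := by
  rw [pvFinal, List.getElem?_map, PySem.List.getElem?_enumerate, List.getElem?_eq_getElem hj]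
  simp

theorem pv_alt_eq_final (devices : List (List (String × String))) :
    assign_stable_aliases_alt devices = pvFinal devices := by
  refine List.ext_getElem? fun j => ?_
  refine (pv_master
      (fun (t : Int × String × String) => t.1.toNat)
      (fun t => t.2.1 ++ " #" ++ PySem.Int.toStr (1 +
        (((((PySem.List.enumerate devices).filter (fun p => pvEligible p.2)).map
            (fun p => (p.1, pvKey p.2, pvDget p.2 "first_seen" ""))).filter
            (fun u => u.2.1 == t.2.1)).countP
            (fun u => u.2.2 < t.2.2 || (u.2.2 == t.2.2 && u.1 < t.1)) : Int)))
      (fun t => 2 ≤ ((((PySem.List.enumerate devices).filter (fun p => pvEligible p.2)).map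
            (fun p => (p.1, pvKey p.2, pvDget p.2 "first_seen" ""))).filter
            (fun u => u.2.1 == t.2.1)).length)
      (((PySem.List.enumerate devices).filter (fun p => pvEligible p.2)).map
        (fun p => (p.1, pvKey p.2, pvDget p.2 "first_seen" "")))
      devices ?_ j).trans ?_
  · rw [List.filter_map, List.map_map]
    refine pv_map_toNat_nodup _ (((PySem.List.pairwise_lt_enumerate devices 0).filter _).filter _) ?_
    intro p hp
    rcases (PySem.List.mem_enumerate_iff devices 0 p).mp
      (List.mem_filter.mp (List.mem_filter.mp hp).1).1 with ⟨m, hm, rfl⟩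
    simp
  · by_cases hj : j < devices.length
    · have hfe := pv_find?_enumerate_at
        (fun p => pvEligible p.2 &&
          decide (2 ≤ ((((PySem.List.enumerate devices).filter (fun p => pvEligible p.2)).map
            (fun p => (p.1, pvKey p.2, pvDget p.2 "first_seen" ""))).filter
            (fun u => u.2.1 == pvKey p.2)).length))
        devices j hj 0
      simp only [Nat.zero_add, Nat.cast_zero] at hfe
      have hFval : (((((PySem.List.enumerate devices).filter (fun p => pvEligible p.2)).map
            (fun p => (p.1, pvKey p.2, pvDget p.2 "first_seen" ""))).filter
            (fun t => decide (2 ≤ ((((PySem.List.enumerate devices).filter (fun p => pvEligible p.2)).map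
              (fun p => (p.1, pvKey p.2, pvDget p.2 "first_seen" ""))).filter
              (fun u => u.2.1 == t.2.1)).length))).find?
            (fun t => t.1.toNat == j)) =
          if (pvEligible devices[j] &&
              decide (2 ≤ ((((PySem.List.enumerate devices).filter (fun p => pvEligible p.2)).map
                (fun p => (p.1, pvKey p.2, pvDget p.2 "first_seen" ""))).filter
                (fun u => u.2.1 == pvKey devices[j])).length)) = true
          then some ((j : Int), pvKey devices[j], pvDget devices[j] "first_seen" "") else none := by
        rw [List.filter_map, List.find?_map]
        rw [List.filter_filter]
        rw [List.find?_filter]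
        rw [pv_find?_congr _ _
          (fun p => (pvEligible p.2 &&
            decide (2 ≤ ((((PySem.List.enumerate devices).filter (fun p => pvEligible p.2)).map
              (fun p => (p.1, pvKey p.2, pvDget p.2 "first_seen" ""))).filter
              (fun u => u.2.1 == pvKey p.2)).length)) && p.1 == ((j : Nat) : Int))
          ?_]
        · rw [hfe]
          by_cases hCC : (pvEligible devices[j] &&
              decide (2 ≤ ((((PySem.List.enumerate devices).filter (fun p => pvEligible p.2)).map
                (fun p => (p.1, pvKey p.2, pvDget p.2 "first_seen" ""))).filter
                (fun u => u.2.1 == pvKey devices[j])).length)) = true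
          · simp [hCC]
          · simp only [Bool.not_eq_true] at hCC
            simp [hCC]
        · intro p hp
          rcases (PySem.List.mem_enumerate_iff devices 0 p).mp hp with ⟨m, hm, rfl⟩
          by_cases hmj : m = j
          · subst hmj
            have h3 : ((m : Nat) == m) = true := by simp
            have h4 : (((0 : Int) + (m : Int)).toNat == m) = true := by
              simp only [beq_iff_eq]; omega
            have h5 : (((0 : Int) + (m : Int)) == ((m : Nat) : Int)) = true := by
              simp only [beq_iff_eq]; omega
            simp [Bool.and_comm]
          · have h3 : ((m : Nat) == j) = false := by simp [hmj]
            have h6 : (((m : Int)) == ((j : Nat) : Int)) = false := by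
              simp only [beq_eq_false_iff_ne, ne_eq]; intro h; apply hmj; omega
            simp [h3, h6]
      rw [hFval]
      have hEq : (pvEligible devices[j] &&
          decide (2 ≤ ((((PySem.List.enumerate devices).filter (fun p => pvEligible p.2)).map
            (fun p => (p.1, pvKey p.2, pvDget p.2 "first_seen" ""))).filter
            (fun u => u.2.1 == pvKey devices[j])).length)) =
          (pvEligible devices[j] && decide (2 ≤ (pvGrp devices (pvKey devices[j])).length)) := by
        simp only [List.filter_map, List.length_map]
        rfl
      by_cases hC : (pvEligible devices[j] &&
          decide (2 ≤ (pvGrp devices (pvKey devices[j])).length)) = true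
      · rw [if_pos (by rw [hEq]; exact hC)]
        simp only [Option.elim_some]
        rw [if_pos hj]
        rw [pv_final_getElem? devices j hj]
        rw [if_pos hC]
        rw [pv_getD_eq devices j hj]
        congr 1
        simp only [pvUpd, pvAlias]
        rw [List.filter_map, List.countP_map]
        rfl
      · rw [if_neg (by rw [hEq]; exact hC)]
        simp only [Option.elim_none]
        rw [pv_final_getElem? devices j hj]
        rw [if_neg hC]
        rw [List.getElem?_eq_getElem hj]
    · -- j out of range: both sides are none
      have hfin : (pvFinal devices)[j]? = none := by
        rw [List.getElem?_eq_none]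
        rw [pv_final_length]
        omega
      rw [hfin]
      cases hf : (((((PySem.List.enumerate devices).filter (fun p => pvEligible p.2)).map
          (fun p => (p.1, pvKey p.2, pvDget p.2 "first_seen" ""))).filter
          (fun t => decide (2 ≤ ((((PySem.List.enumerate devices).filter (fun p => pvEligible p.2)).map
            (fun p => (p.1, pvKey p.2, pvDget p.2 "first_seen" ""))).filter
            (fun u => u.2.1 == t.2.1)).length))).find?
          (fun t => t.1.toNat == j)) with
      | none =>
        simp only [Option.elim_none]
        rw [List.getElem?_eq_none (by omega)]
      | some t =>
        simp only [Option.elim_some]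
        rw [if_neg (by omega)]

-- the A port: outer loop over the grouping dict ------------------------------

lemma pv_keys_nodup (devices : List (List (String × String))) : (pvKeys devices).Nodup :=
  PySem.Set.nodup_ofList _

lemma pv_step (devices : List (List (String × String))) (done : List String) (k : String)
    (hk : k ∉ done) :
    pvStep2 devices (pvPartial devices done) k = pvPartial devices (done ++ [k]) := by
  by_cases hlen : (pvGIdx devices k).length < 2
  · rw [pvStep2, if_pos hlen]
    rw [pvPartial, pvPartial]
    refine List.map_congr_left ?_
    intro p _
    by_cases hpk : pvKey p.2 = k
    · have hgl : (pvGrp devices (pvKey p.2)).length = (pvGIdx devices k).length := by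
        rw [hpk, pvGIdx, List.length_map]
      have hlg : ¬ (2 ≤ (pvGrp devices (pvKey p.2)).length) := by omega
      simp [hlg]
    · have hmemiff : (pvKey p.2 ∈ done ++ [k]) ↔ (pvKey p.2 ∈ done) := by simp [hpk]
      simp [hmemiff]
  · rw [pvStep2, if_neg hlen]
    refine List.ext_getElem? fun j => ?_
    have hlen_devs : (pvPartial devices done).length = devices.length :=
      pv_partial_length devices done
    have hgetD_orig : ∀ (m : Nat) (hm : m < devices.length),
        pvEligible devices[m] = true → pvKey devices[m] = k →
        (pvPartial devices done).getD m [] = devices[m] := by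
      intro m hm helig hkey
      rw [List.getD_eq_getElem?_getD, pv_partial_getElem? devices done m hm]
      have hnotin : decide (pvKey devices[m] ∈ done) = false := by
        simp only [decide_eq_false_iff_not]
        rw [hkey]
        exact hk
      simp [hnotin]
    have hagree : ∀ i ∈ pvGIdx devices k,
        pvDget ((pvPartial devices done).getD i.toNat []) "first_seen" "" = pvF0 devices i := by
      intro i hi
      rcases List.mem_map.mp hi with ⟨p, hp, rfl⟩
      rcases pvGrp_mem devices k p hp with ⟨m, hm, rfl, helig, hkey⟩
      have htn : ((m : Int), devices[m]).1.toNat = m := by simp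
      rw [htn, hgetD_orig m hm helig hkey, pvF0, htn, pv_getD_eq devices m hm]
      rfl
    set devs := pvPartial devices done with hdevs
    set zs := PySem.List.sorted (pvGIdx devices k)
      (fun i => pvDget (devs.getD i.toNat []) "first_seen" "") with hzs
    have hzs_mem : ∀ i, i ∈ zs ↔ i ∈ pvGIdx devices k := fun i =>
      PySem.List.mem_sorted (pvGIdx devices k) _ false i
    have hzs_nn : ∀ i ∈ zs, 0 ≤ i := fun i hi =>
      pvGIdx_nonneg devices k i ((hzs_mem i).mp hi)
    have hzs_perm : zs.Perm (pvGIdx devices k) := PySem.List.sorted_perm _ _ _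
    have hzs_pw : zs.Pairwise (fun a b => pvRb (pvF0 devices) a b = true) := by
      have h1 : zs.Pairwise (pvR (fun i => pvDget (devs.getD i.toNat []) "first_seen" "")) :=
        pv_sorted_pairwise_stable _ _ (pvGIdx_pairwise devices k)
      refine List.Pairwise.imp_of_mem ?_ h1
      intro a b ha hb hr
      rw [pvRb_iff]
      simp only [pvR] at hr
      rwa [hagree a ((hzs_mem a).mp ha), hagree b ((hzs_mem b).mp hb)] at hr
    refine (pv_master0 (fun (q : Int × Int) => q.2.toNat)
      (fun q => k ++ " #" ++ PySem.Int.toStr q.1)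
      (PySem.List.enumerate zs 1) devs ?_ j).trans ?_
    · have hmm : (PySem.List.enumerate zs 1).map (fun (q : Int × Int) => q.2.toNat) =
          zs.map Int.toNat := by
        have := PySem.List.map_snd_enumerate zs 1
        calc (PySem.List.enumerate zs 1).map (fun (q : Int × Int) => q.2.toNat)
            = ((PySem.List.enumerate zs 1).map (fun (q : Int × Int) => q.2)).map Int.toNat := by
              rw [List.map_map]; rfl
          _ = zs.map Int.toNat := by rw [PySem.List.map_snd_enumerate]
      rw [hmm]
      exact pv_int_toNat_nodup zs (hzs_perm.nodup_iff.mpr (pvGIdx_nodup devices k)) hzs_nn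
    · by_cases hj : j < devices.length
      · by_cases hmem : (j : Int) ∈ zs
        · rw [pv_find?_enum_val (pvRb (pvF0 devices)) (pvRb_asymm _) (pvRb_irrefl _) j
            zs hzs_pw hzs_nn hmem 1]
          simp only [Option.elim_some]
          have hj' : j < devs.length := by omega
          rw [if_pos hj']
          obtain ⟨helig, hkey⟩ := (pvGIdx_mem_iff devices k j hj).mp ((hzs_mem _).mp hmem)
          have hgdj : devs.getD j [] = devices[j] := hgetD_orig j hj helig hkey
          rw [pv_partial_getElem? devices (done ++ [k]) j hj]
          have hcond : (pvEligible devices[j] && decide (pvKey devices[j] ∈ done ++ [k]) &&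
              decide (2 ≤ (pvGrp devices (pvKey devices[j])).length)) = true := by
            have h1 : pvKey devices[j] ∈ done ++ [k] := by rw [hkey]; simp
            have h2 : 2 ≤ (pvGrp devices (pvKey devices[j])).length := by
              rw [hkey]
              have : (pvGIdx devices k).length = (pvGrp devices k).length := by
                rw [pvGIdx, List.length_map]
              omega
            simp [helig, h1, h2]
          rw [if_pos hcond]
          have hcnt : zs.countP (fun y => pvRb (pvF0 devices) y (j : Int)) =
              (pvGrp devices k).countP (fun u => pvLt u ((j : Int), devices[j])) := by
            rw [hzs_perm.countP_eq]
            rw [pvGIdx, List.countP_map]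
            refine pv_countP_congr _ _ _ ?_
            intro u hu
            rcases pvGrp_mem devices k u hu with ⟨m, hm, rfl, helig', hkey'⟩
            simp only [Function.comp, pvRb, pvLt, pvF0, pvFS]
            simp [List.getD_eq_getElem?_getD, List.getElem?_eq_getElem hm, List.getElem?_eq_getElem hj]
          rw [hgdj]
          simp only [pvUpd, pvAlias]
          rw [hkey, hcnt]
        · rw [pv_find?_enum_val_none j zs hzs_nn hmem 1]
          simp only [Option.elim_none]
          rw [hdevs, pv_partial_getElem? devices done j hj,
            pv_partial_getElem? devices (done ++ [k]) j hj]
          by_cases hpk : pvKey devices[j] = k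
          · have helig : pvEligible devices[j] = false := by
              rw [← Bool.not_eq_true]
              intro helig
              exact hmem ((hzs_mem _).mpr ((pvGIdx_mem_iff devices k j hj).mpr ⟨helig, hpk⟩))
            simp [helig]
          · have hmemiff : (pvKey devices[j] ∈ done ++ [k]) ↔ (pvKey devices[j] ∈ done) := by
              simp [hpk]
            simp [hmemiff]
      · have hnone2 : (pvPartial devices (done ++ [k]))[j]? = none := by
          rw [List.getElem?_eq_none]
          rw [pv_partial_length]
          omega
        rw [hnone2]
        cases hf : (PySem.List.enumerate zs 1).find? (fun (q : Int × Int) => q.2.toNat == j) with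
        | none =>
          simp only [Option.elim_none]
          rw [List.getElem?_eq_none (by omega)]
        | some t =>
          simp only [Option.elim_some]
          rw [if_neg (by omega)]

lemma pv_outer (devices : List (List (String × String))) :
    ∀ (ks done : List String), (done ++ ks).Nodup →
    ks.foldl (pvStep2 devices) (pvPartial devices done) = pvPartial devices (done ++ ks) := by
  intro ks
  induction ks with
  | nil => intro done _; simp
  | cons k kt ih =>
    intro done hnd
    simp only [List.foldl_cons]
    have hk : k ∉ done := by
      intro hkdone
      have hdisj := (List.nodup_append.mp hnd).2.2
      exact hdisj k hkdone k (by simp) rfl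
    rw [pv_step devices done k hk]
    have hnd' : ((done ++ [k]) ++ kt).Nodup := by simpa [List.append_assoc] using hnd
    have h := ih (done ++ [k]) hnd'
    rw [h]
    simp [List.append_assoc]

theorem pv_a_eq_final (devices : List (List (String × String))) :
    assign_stable_aliases devices = pvFinal devices := by
  show ((PySem.List.enumerate devices).foldl
      (fun g p => if pvEligible p.2 then g.modify (pvKey p.2) [] (fun l => l ++ [p.1]) else g)
      PySem.Dict.empty).items.foldl
    (fun devs kg =>
      if kg.2.length < 2 then devs
      else
        (PySem.List.enumerate
          (PySem.List.sorted kg.2 (fun i => pvDget (devs.getD i.toNat []) "first_seen" "")) 1).foldl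
          (fun ds q => ds.set q.2.toNat (pvSetAlias (ds.getD q.2.toNat []) (kg.1 ++ " #" ++ PySem.Int.toStr q.1)))
          devs) devices = pvFinal devices
  rw [pv_groups_spec devices]
  rw [List.foldl_map]
  have hstep : (fun (x : List (List (String × String))) (y : String) =>
      (fun devs (kg : String × List Int) =>
        if kg.2.length < 2 then devs
        else
          (PySem.List.enumerate
            (PySem.List.sorted kg.2 (fun i => pvDget (devs.getD i.toNat []) "first_seen" "")) 1).foldl
            (fun ds q => ds.set q.2.toNat (pvSetAlias (ds.getD q.2.toNat []) (kg.1 ++ " #" ++ PySem.Int.toStr q.1)))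
            devs) x (y, pvGIdx devices y)) = pvStep2 devices := by
    funext devs k
    rfl
  rw [hstep]
  have h0 := pv_outer devices (pvKeys devices) [] (by simpa using pv_keys_nodup devices)
  rw [pv_partial_nil] at h0
  rw [h0]
  simpa using pv_partial_full devices

-- ===== VERDICT (by name: the statement is the Claim_ definition above) =====
theorem assign_stable_aliases_spec : Claim_equal_assign_stable_aliases := by
  intro devices _
  unfold Spec_assign_stable_aliases
  rw [pv_a_eq_final, pv_alt_eq_final]
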